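-- pv_equiv track=rewrite | github.com/Man0dya/contribution-canon | app.py | calculate_current_streak
-- ===== SOURCE A (Python) =====
-- def calculate_current_streak(contribution_grid: list) -> int:
--     """Calculate current contribution streak (from most recent day)."""
--     # Flatten grid and reverse to start from most recent
--     all_days = []
--     for week in contribution_grid:
--         all_days.extend(week)
--
--     all_days.reverse()
--
--     streak = 0
--     for day in all_days:
--         if day['count'] > 0:
--             streak += 1
--         else:
--             break
--
--     return streak
-- ===== SOURCE B (Python) =====
-- def calculate_current_streak(contribution_grid: list) -> int:
--     """Calculate current contribution streak (from most recent day)."""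
--     # Single forward pass: the streak is the number of days strictly after the
--     # last day that is not a positive contribution (count <= 0 or no 'count'
--     # key), so track the total day count and the 1-based position of the last
--     # such day.
--     total = 0
--     bad_seen = 0
--     for week in contribution_grid:
--         for day in week:
--             total += 1
--             if day.get('count', 0) <= 0:
--                 bad_seen = total
--     return total - bad_seen
-- ===== Notes on version B (the rewrite author's own statement) =====
-- stated objective: alternative
-- what changed: B replaces A's flatten-copy-reverse-and-break-on-first-bad scan by a single forward pass that tracks the total number of days and the 1-based position of the last non-positive (or key-less) day, returning total minus that position.
import Mathlib
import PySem

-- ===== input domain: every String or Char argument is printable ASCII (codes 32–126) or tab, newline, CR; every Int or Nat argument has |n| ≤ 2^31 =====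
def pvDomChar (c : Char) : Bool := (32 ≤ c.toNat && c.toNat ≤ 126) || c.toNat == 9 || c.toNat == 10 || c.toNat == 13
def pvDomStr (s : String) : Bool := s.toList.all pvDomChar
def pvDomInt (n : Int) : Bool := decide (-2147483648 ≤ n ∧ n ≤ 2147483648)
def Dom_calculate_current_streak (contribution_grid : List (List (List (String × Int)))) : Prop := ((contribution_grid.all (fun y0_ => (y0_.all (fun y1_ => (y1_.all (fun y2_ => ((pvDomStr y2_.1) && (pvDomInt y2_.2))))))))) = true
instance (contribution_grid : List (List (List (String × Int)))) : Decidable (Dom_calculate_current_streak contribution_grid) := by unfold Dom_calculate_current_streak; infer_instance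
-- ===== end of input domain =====

-- B replaces A's flatten-copy-reverse-and-break scan by one forward pass tracking the
-- total day count and the position of the last non-positive-or-key-less day
-- (streak = total - pos); equivalence on the grids on which Python A returns (Pre_).

-- ===== PORT A =====
-- the 'for day in all_days: if … else break' loop; the none branch (missing 'count'
-- key) is outside Pre_ (Python raises KeyError there)
def pvAloop : List (List (String × Int)) → Int → Int
  | [], streak => streak
  | day :: rest, streak =>
    match (PySem.Dict.mk day).get? "count" with
    | some c => if c > 0 then pvAloop rest (streak + 1) else streak
    | none => streak

def calculate_current_streak (contribution_grid : List (List (List (String × Int)))) : Int :=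
  -- all_days = []; for week in grid: all_days.extend(week)
  let all_days := contribution_grid.foldl (fun acc week => acc ++ week) []
  -- all_days.reverse()
  let all_days := all_days.reverse
  pvAloop all_days 0

-- ===== PORT B =====
-- one step of B's inner loop on the state (total, bad_seen); day.get('count', 0) is
-- the getD: a missing key counts as 0, i.e. a non-positive day
def pvBstep (st : Int × Int) (day : List (String × Int)) : Int × Int :=
  let t := st.1 + 1
  if (PySem.Dict.mk day).getD "count" 0 ≤ 0 then (t, t) else (t, st.2)

def calculate_current_streak_alt (contribution_grid : List (List (List (String × Int)))) : Int :=
  let st := contribution_grid.foldl (fun st week => week.foldl pvBstep st) (0, 0)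
  st.1 - st.2

-- ===== PRECONDITION & SPEC =====
-- "the first element of the list that is not a positive-'count' day, if any, still has
-- the 'count' key" (first-failure characterisation of A's KeyError; stated as a recursion
-- because the equivalent dropWhile/quantifier forms are infeasible for kernel 'decide')
def pvNoKeyError : List (List (String × Int)) → Bool
  | [] => true
  | d :: rest =>
    match (PySem.Dict.mk d).get? "count" with
    | some c => if 0 < c then pvNoKeyError rest else true
    | none => false

-- Pre_ excludes exactly the grids on which Python A raises KeyError: those where the first
-- day (from the most recent) that is not a positive-'count' day lacks the 'count' key.
def Pre_calculate_current_streak (contribution_grid : List (List (List (String × Int)))) : Prop :=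
  pvNoKeyError contribution_grid.flatten.reverse = true
instance (contribution_grid : List (List (List (String × Int)))) : Decidable (Pre_calculate_current_streak contribution_grid) := by unfold Pre_calculate_current_streak; infer_instance

def pvWitness_calculate_current_streak : (List (List (List (String × Int)))) :=
  [[[("count", 2)], [("count", 0)]], [[("count", 1)]]]

def Spec_calculate_current_streak (contribution_grid : List (List (List (String × Int)))) (out : Int) : Prop := out = calculate_current_streak_alt contribution_grid
instance (contribution_grid : List (List (List (String × Int)))) (out : Int) : Decidable (Spec_calculate_current_streak contribution_grid out) := by unfold Spec_calculate_current_streak; infer_instance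

-- ===== CLAIM =====
def Claim_equal_calculate_current_streak : Prop := ∀ (contribution_grid : List (List (List (String × Int)))), Dom_calculate_current_streak contribution_grid → Pre_calculate_current_streak contribution_grid → Spec_calculate_current_streak contribution_grid (calculate_current_streak contribution_grid)

-- ===== LEMMAS AND PROOFS =====

-- 'day has a positive count' (missing key counts as not positive, matching both ports'
-- none branches)
def pvPos (day : List (String × Int)) : Bool :=
  match (PySem.Dict.mk day).get? "count" with
  | some c => decide (0 < c)
  | none => false

-- leading positive run, = A's loop shape
def pvLp : List (List (String × Int)) → Int
  | [] => 0
  | d :: rest => if pvPos d then 1 + pvLp rest else 0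

-- trailing positive run accumulated front-to-back
def pvRun (l : List (List (String × Int))) (r : Int) : Int :=
  l.foldl (fun r d => if pvPos d then r + 1 else 0) r

-- A's flattening foldl is List.flatten
theorem pv_foldl_append (grid : List (List (List (String × Int)))) (acc : List (List (String × Int))) :
    grid.foldl (fun acc week => acc ++ week) acc = acc ++ grid.flatten := by
  induction grid generalizing acc with
  | nil => simp
  | cons w rest ih => simp [List.foldl, ih, List.flatten, List.append_assoc]

-- A's loop counts the leading positive run
theorem pvAloop_eq_lp (l : List (List (String × Int))) (s : Int) :
    pvAloop l s = s + pvLp l := by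
  induction l generalizing s with
  | nil => simp [pvAloop, pvLp]
  | cons d rest ih =>
    rcases hc : (PySem.Dict.mk d).get? "count" with _ | c
    · simp [pvAloop, pvLp, pvPos, hc]
    · by_cases h : 0 < c <;> simp [pvAloop, pvLp, pvPos, hc, h, ih]; ring

-- the trailing run computed forward equals the leading run of the reversal
theorem pvRun_eq_lp_reverse (l : List (List (String × Int))) :
    pvRun l 0 = pvLp l.reverse := by
  induction l using List.reverseRecOn with
  | nil => simp [pvRun, pvLp]
  | append_singleton l d ih =>
    simp only [pvRun, List.foldl_append, List.foldl_cons, List.foldl_nil,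
      List.reverse_append, List.reverse_cons, List.reverse_nil, List.nil_append,
      List.cons_append, pvLp] at *
    by_cases h : pvPos d <;> simp [h, ih]; ring

-- pvBstep in terms of pvPos
theorem pvBstep_eq (st : Int × Int) (d : List (String × Int)) :
    pvBstep st d = (st.1 + 1, if pvPos d then st.2 else st.1 + 1) := by
  unfold pvBstep pvPos
  rcases hc : (PySem.Dict.mk d).get? "count" with _ | c
  · simp [PySem.Dict.getD, hc]
  · by_cases h : c ≤ 0
    · have h' : ¬ (0 < c) := by omega
      simp [PySem.Dict.getD, hc, h, h']
    · have h' : (0 : Int) < c := by omega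
      simp [PySem.Dict.getD, hc, h, h']

-- invariant of B's fold: total counts days, total - bad_seen is the trailing run
theorem pvBfold_invariant (l : List (List (String × Int))) (t r : Int) :
    l.foldl pvBstep (t, t - r) = (t + l.length, t + l.length - pvRun l r) := by
  induction l generalizing t r with
  | nil => simp [pvRun]
  | cons d rest ih =>
    simp only [List.foldl_cons, pvBstep_eq, pvRun] at *
    by_cases h : pvPos d
    · have e : ((t : Int) + 1, (if pvPos d then t - r else t + 1))
          = (t + 1, (t + 1) - (r + 1)) := by
        simp only [if_pos h, Prod.mk.injEq]
        exact ⟨trivial, by ring⟩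
      rw [e, ih]
      simp [h]
      ring
    · have e : ((t : Int) + 1, (if pvPos d then t - r else t + 1))
          = (t + 1, (t + 1) - 0) := by simp [h]
      rw [e, ih]
      simp [h]
      ring

-- ===== VERDICT =====
theorem calculate_current_streak_spec : Claim_equal_calculate_current_streak := by
  intro grid _ _
  unfold Spec_calculate_current_streak calculate_current_streak calculate_current_streak_alt
  have hB : grid.foldl (fun st week => week.foldl pvBstep st) (0, 0)
      = grid.flatten.foldl pvBstep (0, 0) := by
    rw [List.foldl_flatten]
  have h0 : ((0 : Int), (0 : Int)) = ((0 : Int), (0 : Int) - 0) := by norm_num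
  rw [hB, h0, pvBfold_invariant]
  simp only [pv_foldl_append, List.nil_append, pvAloop_eq_lp, ← pvRun_eq_lp_reverse]
  ring
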